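-- pv_equiv track=rewrite | github.com/cxnejxblancx/Programming-and-Problem-Solving | Homework/Hw08/hw8_q5.py | get_matryoshka_list
-- ===== SOURCE A (Python) =====
-- def get_matryoshka_list(original):
--     # variables
--     start = 0
--     new_list = []
--     ind_list = []
--
--     # for-loop -- iterate through each index in the list
--     for index in range((len(original))):
--         # conditionals --> check that theres another index above the current one
--         if index < (len(original) - 1):
--             # conditionals --> check if first value less than the second value
--             if original[start] < original[index + 1]:
--                 ind_list.append(original[index])
--                 start += 1
--
--             else:
--                 ind_list.append(original[start])
--                 start = index + 1
--                 new_list.append(ind_list)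
--                 ind_list = []
--
--         else:
--             ind_list.append(original[index])
--             new_list.append(ind_list)
--
--     # return
--     return new_list
-- ===== SOURCE B (Python) =====
-- def get_matryoshka_list(original):
--     # Boundary-table decomposition: compute the start index of every strictly
--     # increasing run, then slice the runs out in a second pass.
--     if not original:
--         return []
--     n = len(original)
--     bounds = [0]
--     for i in range(1, n):
--         if original[i - 1] >= original[i]:
--             bounds.append(i)
--     bounds.append(n)
--     return [original[b:e] for b, e in zip(bounds, bounds[1:])]
-- ===== Notes on version B (the rewrite author's own statement) =====
-- stated objective: alternative
-- what changed: Replaces A's single stateful loop (start pointer plus element-by-element accumulation of the current run) by a two-pass index-table decomposition: first collect the run-start boundary indices, then slice each run out between consecutive boundaries.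
import Mathlib
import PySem

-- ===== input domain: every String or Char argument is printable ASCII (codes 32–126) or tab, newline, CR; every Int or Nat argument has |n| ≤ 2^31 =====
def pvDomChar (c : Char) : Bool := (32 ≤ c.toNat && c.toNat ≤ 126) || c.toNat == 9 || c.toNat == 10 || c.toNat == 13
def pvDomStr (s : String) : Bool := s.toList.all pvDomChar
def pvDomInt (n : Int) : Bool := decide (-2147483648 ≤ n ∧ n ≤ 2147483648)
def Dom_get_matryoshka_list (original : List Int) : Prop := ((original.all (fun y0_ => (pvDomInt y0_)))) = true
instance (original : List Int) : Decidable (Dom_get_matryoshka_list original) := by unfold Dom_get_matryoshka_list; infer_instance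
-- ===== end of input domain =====

-- B replaces A's single stateful accumulation loop by a two-pass boundary-table
-- decomposition (collect run-start indices, then slice); objective: alternative (same cost).


-- ===== PORT A =====
-- loop body of A's for-loop; state = (start, new_list, ind_list).
-- Indices fed to original[...] are always in range (start = index is a loop invariant),
-- so Python never raises here and pyGetD's default is never read.
def stepA (original : List Int) (s : Int × List (List Int) × List Int) (index : Int) :
    Int × List (List Int) × List Int :=
  if index < (original.length : Int) - 1 then
    if PySem.List.pyGetD original s.1 0 < PySem.List.pyGetD original (index + 1) 0 then
      (s.1 + 1, s.2.1, s.2.2 ++ [PySem.List.pyGetD original index 0])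
    else
      (index + 1, s.2.1 ++ [s.2.2 ++ [PySem.List.pyGetD original s.1 0]], [])
  else
    (s.1, s.2.1 ++ [s.2.2 ++ [PySem.List.pyGetD original index 0]],
      s.2.2 ++ [PySem.List.pyGetD original index 0])

def get_matryoshka_list (original : List Int) : List (List Int) :=
  ((PySem.List.pyRange 0 (original.length : Int) 1).foldl (stepA original)
    (0, [], [])).2.1

-- ===== PORT B =====
def get_matryoshka_list_alt (original : List Int) : List (List Int) :=
  if original = [] then []
  else
    let n : Int := original.length
    let bounds :=
      (PySem.List.pyRange 1 n 1).foldl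
        (fun bs i =>
          if PySem.List.pyGetD original (i - 1) 0 ≥ PySem.List.pyGetD original i 0 then
            bs ++ [i]
          else bs)
        [(0 : Int)]
    let bounds := bounds ++ [n]
    (bounds.zip bounds.tail).map
      (fun be => PySem.List.slice original (some be.1) (some be.2))

-- ===== PRECONDITION & SPEC =====
def Spec_get_matryoshka_list (original : List Int) (out : List (List Int)) : Prop := out = get_matryoshka_list_alt original
instance (original : List Int) (out : List (List Int)) : Decidable (Spec_get_matryoshka_list original out) := by unfold Spec_get_matryoshka_list; infer_instance

-- ===== CLAIM (what is proved, stated in full; the proofs are below) =====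
def Claim_equal_get_matryoshka_list : Prop := ∀ (original : List Int), Dom_get_matryoshka_list original → Spec_get_matryoshka_list original (get_matryoshka_list original)

-- ===== LEMMAS AND PROOFS =====

-- intermediate spec: split off strictly increasing runs, carrying the current run `cur`
def chunkAux (cur : List Int) : Int → List Int → List (List Int)
  | x, [] => [cur ++ [x]]
  | x, y :: ys => if x < y then chunkAux (cur ++ [x]) y ys else (cur ++ [x]) :: chunkAux [] y ys

-- slices between consecutive boundaries
def slicesOf (o : List Int) : List Int → List (List Int)
  | b :: e :: rest => PySem.List.slice o (some b) (some e) :: slicesOf o (e :: rest)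
  | _ => []

theorem getD_of_drop (o : List Int) (i : Nat) (x : Int) (rest : List Int)
    (h : o.drop i = x :: rest) : PySem.List.pyGetD o (i : Int) 0 = x := by
  have h0 : o[i]? = some x := by
    have h1 : (o.drop i)[0]? = o[i + 0]? := List.getElem?_drop
    simp [h] at h1
    exact h1.symm
  simp [PySem.List.pyGetD_natCast, List.getD_eq_getElem?_getD, h0]

theorem len_of_drop (o : List Int) (i : Nat) (x : Int) (rest : List Int)
    (h : o.drop i = x :: rest) : o.length = i + rest.length + 1 := by
  have := congrArg List.length h
  simp [List.length_drop] at this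
  omega

theorem drop_succ_of_drop (o : List Int) (i : Nat) (x : Int) (rest : List Int)
    (h : o.drop i = x :: rest) : o.drop (i + 1) = rest := by
  have : o.drop (i + 1) = (o.drop i).drop 1 := by
    rw [List.drop_drop]
  simp [this, h]

theorem chunkAux_cur (rest : List Int) : ∀ (x : Int) (cur : List Int),
    chunkAux cur x rest
      = (cur ++ (chunkAux [] x rest).headI) :: (chunkAux [] x rest).tail := by
  induction rest with
  | nil => intro x cur; simp [chunkAux]
  | cons y ys ih =>
    intro x cur
    by_cases hxy : x < y
    · simp only [chunkAux, if_pos hxy, List.nil_append]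
      rw [ih y (cur ++ [x]), ih y [x]]
      simp
    · simp [chunkAux, if_neg hxy]

-- ===== A-side main lemma =====
theorem A_main (o : List Int) :
    ∀ (rest : List Int) (x : Int) (i : Nat) (acc : List (List Int)) (cur : List Int),
      o.drop i = x :: rest →
      ((PySem.List.pyRange (i : Int) (o.length : Int) 1).foldl (stepA o)
        ((i : Int), acc, cur)).2.1 = acc ++ chunkAux cur x rest := by
  intro rest
  induction rest with
  | nil =>
    intro x i acc cur h
    have hlen := len_of_drop o i x [] h
    simp only [List.length_nil] at hlen
    have hi : (i : Int) < (o.length : Int) := by omega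
    rw [PySem.List.pyRange_one_cons hi]
    have hx := getD_of_drop o i x [] h
    have hcond : ¬ ((i : Int) < (o.length : Int) - 1) := by
      omega
    simp only [List.foldl_cons, stepA, if_neg hcond]
    have hnil : PySem.List.pyRange ((i : Int) + 1) (o.length : Int) 1 = [] := by
      apply PySem.List.pyRange_one_eq_nil; omega
    simp [hnil, hx, chunkAux]
  | cons y ys ih =>
    intro x i acc cur h
    have hlen := len_of_drop o i x (y :: ys) h
    simp only [List.length_cons] at hlen
    have hdrop1 : o.drop (i + 1) = y :: ys := drop_succ_of_drop o i x (y :: ys) h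
    have hi : (i : Int) < (o.length : Int) := by omega
    rw [PySem.List.pyRange_one_cons hi]
    have hx := getD_of_drop o i x (y :: ys) h
    have hy : PySem.List.pyGetD o ((i : Int) + 1) 0 = y := by
      have := getD_of_drop o (i + 1) y ys hdrop1
      push_cast at this ⊢
      exact this
    have hcond : (i : Int) < (o.length : Int) - 1 := by omega
    have hcast : (i : Int) + 1 = ((i + 1 : Nat) : Int) := by omega
    by_cases hxy : x < y
    · simp only [List.foldl_cons, stepA, if_pos hcond, hx, hy, if_pos hxy]
      rw [hcast, ih y (i + 1) acc (cur ++ [x]) hdrop1]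
      simp [chunkAux, hxy]
    · simp only [List.foldl_cons, stepA, if_pos hcond, hx, hy, if_neg hxy]
      rw [hcast, ih y (i + 1) (acc ++ [cur ++ [x]]) [] hdrop1]
      simp [chunkAux, hxy]

-- ===== B-side lemmas =====
theorem map_zip_tail (o : List Int) : ∀ (l : List Int),
    (l.zip l.tail).map (fun be => PySem.List.slice o (some be.1) (some be.2))
      = slicesOf o l
  | [] => rfl
  | [_] => rfl
  | b :: e :: rest => by
    simp only [List.tail_cons, List.zip_cons_cons, List.map_cons, slicesOf]
    rw [← map_zip_tail o (e :: rest)]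
    simp

theorem B_main (o : List Int) :
    ∀ (rest : List Int) (x : Int) (i : Nat),
      o.drop i = x :: rest →
      slicesOf o ((i : Int) ::
        ((PySem.List.pyRange ((i : Int) + 1) (o.length : Int) 1).filter
          (fun j => decide (PySem.List.pyGetD o (j - 1) 0 ≥ PySem.List.pyGetD o j 0))
          ++ [(o.length : Int)]))
        = chunkAux [] x rest := by
  intro rest
  induction rest with
  | nil =>
    intro x i h
    have hlen := len_of_drop o i x [] h
    simp only [List.length_nil] at hlen
    have hnil : PySem.List.pyRange ((i : Int) + 1) (o.length : Int) 1 = [] := by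
      apply PySem.List.pyRange_one_eq_nil; omega
    have hslice : PySem.List.slice o (some (i : Int)) (some (o.length : Int))
        = [x] := by
      rw [PySem.List.slice_toNat o (by omega) (by omega)]
      have h1 : ((i : Int)).toNat = i := by simp
      have h2 : ((o.length : Int)).toNat = o.length := by simp
      rw [h1, h2, h]
      have h3 : o.length - i = 1 := by omega
      rw [h3]
      rfl
    simp [hnil, slicesOf, hslice, chunkAux]
  | cons y ys ih =>
    intro x i h
    have hlen := len_of_drop o i x (y :: ys) h
    simp only [List.length_cons] at hlen
    have hdrop1 : o.drop (i + 1) = y :: ys := drop_succ_of_drop o i x (y :: ys) h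
    have hx := getD_of_drop o i x (y :: ys) h
    have hy : PySem.List.pyGetD o ((i : Int) + 1) 0 = y := by
      have := getD_of_drop o (i + 1) y ys hdrop1
      push_cast at this ⊢
      exact this
    have hi1 : (i : Int) + 1 < (o.length : Int) := by omega
    rw [PySem.List.pyRange_one_cons hi1]
    have hcast : ((i + 1 : Nat) : Int) = (i : Int) + 1 := by omega
    have hIH := ih y (i + 1) hdrop1
    rw [hcast] at hIH
    by_cases hxy : x < y
    · -- no run boundary at i+1: the filter drops it
      have hp : ¬ (PySem.List.pyGetD o ((i : Int) + 1 - 1) 0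
          ≥ PySem.List.pyGetD o ((i : Int) + 1) 0) := by
        have he : (i : Int) + 1 - 1 = (i : Int) := by ring
        rw [he, hx, hy]; omega
      rw [List.filter_cons_of_neg (by simpa using hp)]
      set t := (PySem.List.pyRange ((i : Int) + 1 + 1) (o.length : Int) 1).filter
          (fun j => decide (PySem.List.pyGetD o (j - 1) 0 ≥ PySem.List.pyGetD o j 0)) with ht
      have he2 : ∀ e, (t ++ [(o.length : Int)]).head? = some e → (i : Int) + 2 ≤ e := by
        intro e hehead
        rcases ht' : t with _ | ⟨c, cs⟩
        · rw [ht'] at hehead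
          simp at hehead
          subst hehead; omega
        · rw [ht'] at hehead
          simp at hehead
          have hc : c ∈ t := by rw [ht']; exact List.mem_cons_self
          rw [ht] at hc
          have := List.mem_of_mem_filter hc
          rw [PySem.List.mem_pyRange_one] at this
          omega
      rcases hte : (t ++ [(o.length : Int)]) with _ | ⟨e, t'⟩
      · exact absurd hte (by simp)
      have hee : (i : Int) + 2 ≤ e := he2 e (by rw [hte]; rfl)
      rw [hte] at hIH
      have hslice_cons : PySem.List.slice o (some (i : Int)) (some e)
          = x :: PySem.List.slice o (some ((i : Int) + 1)) (some e) := by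
        rw [PySem.List.slice_toNat o (by omega) (by omega),
            PySem.List.slice_toNat o (by omega) (by omega)]
        have h1 : ((i : Int)).toNat = i := by simp
        have h2 : ((i : Int) + 1).toNat = i + 1 := by omega
        rw [h1, h2, h, hdrop1]
        have h3 : e.toNat - i = (e.toNat - (i + 1)) + 1 := by omega
        rw [h3, List.take_succ_cons]
      have hunf : slicesOf o ((i : Int) :: e :: t')
          = PySem.List.slice o (some (i : Int)) (some e) :: slicesOf o (e :: t') := rfl
      have hunf' : slicesOf o (((i : Int) + 1) :: e :: t')
          = PySem.List.slice o (some ((i : Int) + 1)) (some e) :: slicesOf o (e :: t') := rfl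
      rw [hunf, hslice_cons]
      have hchunk : chunkAux [] x (y :: ys) = chunkAux [x] y ys := by
        simp [chunkAux, hxy]
      rw [hchunk, chunkAux_cur ys y [x]]
      rw [hunf'] at hIH
      rw [← hIH]
      simp
    · -- run boundary at i+1: the filter keeps it
      have hp : (PySem.List.pyGetD o ((i : Int) + 1 - 1) 0
          ≥ PySem.List.pyGetD o ((i : Int) + 1) 0) := by
        have he : (i : Int) + 1 - 1 = (i : Int) := by ring
        rw [he, hx, hy]; omega
      rw [List.filter_cons_of_pos (by simpa using hp)]
      have hslice1 : PySem.List.slice o (some (i : Int)) (some ((i : Int) + 1)) = [x] := by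
        rw [PySem.List.slice_toNat o (by omega) (by omega)]
        have h1 : ((i : Int)).toNat = i := by simp
        have h2 : ((i : Int) + 1).toNat = i + 1 := by omega
        rw [h1, h2, h]
        have h3 : i + 1 - i = 1 := by omega
        rw [h3]
        rfl
      simp only [List.cons_append, slicesOf, hslice1]
      rw [hIH]
      simp [chunkAux, hxy]

-- ===== VERDICT (by name: the statement is the Claim_ definition above) =====
theorem get_matryoshka_list_spec : Claim_equal_get_matryoshka_list := by
  intro o _
  unfold Spec_get_matryoshka_list
  rcases ho : o with _ | ⟨x, xs⟩
  · rfl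
  · have hA := A_main (x :: xs) xs x 0 [] [] (by simp)
    have hB := B_main (x :: xs) xs x 0 (by simp)
    simp only [Nat.cast_zero, zero_add] at hA hB
    unfold get_matryoshka_list get_matryoshka_list_alt
    rw [hA]
    simp only [List.nil_append]
    rw [if_neg (by simp)]
    rw [PySem.List.foldl_append_ite_eq_filter]
    rw [List.singleton_append, List.cons_append]
    rw [map_zip_tail]
    rw [← hB]
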